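-- pv_equiv track=rewrite | github.com/github/spec-kit | src/specify_cli/bicep/template_explainer.py | _infer_template_purpose
-- ===== SOURCE A (Python) =====
-- from typing import Dict, List, Optional, Set, Any, Tuple
--
-- def _infer_template_purpose(template_data: Dict[str, Any]) -> str:
--     """Infer the business purpose of the template."""
--
--     resources = template_data.get('resources', [])
--     resource_types = [resource.get('type', '') for resource in resources]
--
--     # Common patterns
--     if any('Microsoft.Web/sites' in rt for rt in resource_types):
--         if any('Microsoft.Sql' in rt for rt in resource_types):
--             return "Web application with database backend"
--         else:
--             return "Web application hosting"
--
--     elif any('Microsoft.Storage' in rt for rt in resource_types):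
--         if any('Microsoft.Web' in rt for rt in resource_types):
--             return "Web application with storage"
--         else:
--             return "Data storage solution"
--
--     elif any('Microsoft.Compute/virtualMachines' in rt for rt in resource_types):
--         return "Virtual machine infrastructure"
--
--     elif any('Microsoft.KeyVault' in rt for rt in resource_types):
--         return "Secure secrets and key management"
--
--     else:
--         return "Azure infrastructure deployment"
-- ===== SOURCE B (Python) =====
-- def _infer_template_purpose(template_data):
--     """Infer the business purpose of the template."""
--     # One pass over the resources computing all flags, then a flat rule table.
--     ws = sql = st = web = vm = kv = False
--     for resource in template_data.get('resources', []):
--         rt = resource.get('type', '')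
--         ws = ws or 'Microsoft.Web/sites' in rt
--         sql = sql or 'Microsoft.Sql' in rt
--         st = st or 'Microsoft.Storage' in rt
--         web = web or 'Microsoft.Web' in rt
--         vm = vm or 'Microsoft.Compute/virtualMachines' in rt
--         kv = kv or 'Microsoft.KeyVault' in rt
--     rules = [
--         (ws and sql, "Web application with database backend"),
--         (ws, "Web application hosting"),
--         (st and web, "Web application with storage"),
--         (st, "Data storage solution"),
--         (vm, "Virtual machine infrastructure"),
--         (kv, "Secure secrets and key management"),
--     ]
--     for cond, label in rules:
--         if cond:
--             return label
--     return "Azure infrastructure deployment"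
-- ===== Notes on version B (the rewrite author's own statement) =====
-- stated objective: simpler
-- what changed: Replaces the nested if/elif tree with repeated any()-scans by a single pass over the resources that computes all six substring flags at once, followed by a flat first-match rule table.
import Mathlib
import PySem

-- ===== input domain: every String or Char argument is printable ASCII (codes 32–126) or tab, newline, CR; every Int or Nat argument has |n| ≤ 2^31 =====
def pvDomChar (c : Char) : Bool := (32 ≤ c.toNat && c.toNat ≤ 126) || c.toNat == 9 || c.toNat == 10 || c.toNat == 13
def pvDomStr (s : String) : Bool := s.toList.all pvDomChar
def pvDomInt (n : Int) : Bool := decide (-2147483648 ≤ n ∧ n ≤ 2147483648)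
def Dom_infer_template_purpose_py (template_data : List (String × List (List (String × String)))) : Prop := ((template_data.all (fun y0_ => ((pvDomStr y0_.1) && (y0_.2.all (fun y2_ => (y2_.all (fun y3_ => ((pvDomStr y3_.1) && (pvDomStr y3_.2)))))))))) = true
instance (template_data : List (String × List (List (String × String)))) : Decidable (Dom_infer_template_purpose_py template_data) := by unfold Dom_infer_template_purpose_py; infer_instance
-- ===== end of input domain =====

-- B replaces A's nested if/elif tree with repeated any()-scans by one pass computing
-- six flags plus a flat first-match rule table (objective: simpler).

-- ===== PORT A =====
def infer_template_purpose_py (template_data : List (String × List (List (String × String)))) : String :=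
  let resources := (PySem.Dict.mk template_data).getD "resources" []
  let resource_types := resources.map (fun resource => (PySem.Dict.mk resource).getD "type" "")
  if resource_types.any (fun rt => PySem.Str.isIn "Microsoft.Web/sites" rt) then
    if resource_types.any (fun rt => PySem.Str.isIn "Microsoft.Sql" rt) then
      "Web application with database backend"
    else
      "Web application hosting"
  else if resource_types.any (fun rt => PySem.Str.isIn "Microsoft.Storage" rt) then
    if resource_types.any (fun rt => PySem.Str.isIn "Microsoft.Web" rt) then
      "Web application with storage"
    else
      "Data storage solution"
  else if resource_types.any (fun rt => PySem.Str.isIn "Microsoft.Compute/virtualMachines" rt) then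
    "Virtual machine infrastructure"
  else if resource_types.any (fun rt => PySem.Str.isIn "Microsoft.KeyVault" rt) then
    "Secure secrets and key management"
  else
    "Azure infrastructure deployment"

-- ===== PORT B =====
def infer_template_purpose_py_alt (template_data : List (String × List (List (String × String)))) : String :=
  let flags := ((PySem.Dict.mk template_data).getD "resources" []).foldl
    (fun f resource =>
      let rt := (PySem.Dict.mk resource).getD "type" ""
      (f.1 || PySem.Str.isIn "Microsoft.Web/sites" rt,
       f.2.1 || PySem.Str.isIn "Microsoft.Sql" rt,
       f.2.2.1 || PySem.Str.isIn "Microsoft.Storage" rt,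
       f.2.2.2.1 || PySem.Str.isIn "Microsoft.Web" rt,
       f.2.2.2.2.1 || PySem.Str.isIn "Microsoft.Compute/virtualMachines" rt,
       f.2.2.2.2.2 || PySem.Str.isIn "Microsoft.KeyVault" rt))
    (false, false, false, false, false, false)
  let rules : List (Bool × String) :=
    [(flags.1 && flags.2.1, "Web application with database backend"),
     (flags.1, "Web application hosting"),
     (flags.2.2.1 && flags.2.2.2.1, "Web application with storage"),
     (flags.2.2.1, "Data storage solution"),
     (flags.2.2.2.2.1, "Virtual machine infrastructure"),
     (flags.2.2.2.2.2, "Secure secrets and key management")]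
  match rules.find? (fun r => r.1) with
  | some r => r.2
  | none => "Azure infrastructure deployment"

-- ===== PRECONDITION & SPEC =====
def Spec_infer_template_purpose_py (template_data : List (String × List (List (String × String)))) (out : String) : Prop := out = infer_template_purpose_py_alt template_data
instance (template_data : List (String × List (List (String × String)))) (out : String) : Decidable (Spec_infer_template_purpose_py template_data out) := by unfold Spec_infer_template_purpose_py; infer_instance

-- ===== CLAIM (what is proved, stated in full; the proofs are below) =====
def Claim_equal_infer_template_purpose_py : Prop := ∀ (template_data : List (String × List (List (String × String)))), Dom_infer_template_purpose_py template_data → Spec_infer_template_purpose_py template_data (infer_template_purpose_py template_data)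

-- ===== LEMMAS AND PROOFS =====

-- the one-pass fold computes exactly the six any-scans of A
theorem pv_flags_eq (rs : List (List (String × String))) (f : Bool × Bool × Bool × Bool × Bool × Bool) :
    rs.foldl
      (fun f resource =>
        let rt := (PySem.Dict.mk resource).getD "type" ""
        (f.1 || PySem.Str.isIn "Microsoft.Web/sites" rt,
         f.2.1 || PySem.Str.isIn "Microsoft.Sql" rt,
         f.2.2.1 || PySem.Str.isIn "Microsoft.Storage" rt,
         f.2.2.2.1 || PySem.Str.isIn "Microsoft.Web" rt,
         f.2.2.2.2.1 || PySem.Str.isIn "Microsoft.Compute/virtualMachines" rt,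
         f.2.2.2.2.2 || PySem.Str.isIn "Microsoft.KeyVault" rt)) f
    = (f.1 || rs.any (fun r => PySem.Str.isIn "Microsoft.Web/sites" ((PySem.Dict.mk r).getD "type" "")),
       f.2.1 || rs.any (fun r => PySem.Str.isIn "Microsoft.Sql" ((PySem.Dict.mk r).getD "type" "")),
       f.2.2.1 || rs.any (fun r => PySem.Str.isIn "Microsoft.Storage" ((PySem.Dict.mk r).getD "type" "")),
       f.2.2.2.1 || rs.any (fun r => PySem.Str.isIn "Microsoft.Web" ((PySem.Dict.mk r).getD "type" "")),
       f.2.2.2.2.1 || rs.any (fun r => PySem.Str.isIn "Microsoft.Compute/virtualMachines" ((PySem.Dict.mk r).getD "type" "")),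
       f.2.2.2.2.2 || rs.any (fun r => PySem.Str.isIn "Microsoft.KeyVault" ((PySem.Dict.mk r).getD "type" ""))) := by
  induction rs generalizing f with
  | nil => simp
  | cons r rs ih =>
    simp only [List.foldl_cons, List.any_cons, ih]
    simp [Bool.or_assoc]

-- the flat rule table equals A's nested if/elif tree, as a pure Boolean fact
theorem pv_rules_eq (b1 b2 b3 b4 b5 b6 : Bool) :
    (if b1 then (if b2 then "Web application with database backend" else "Web application hosting")
     else if b3 then (if b4 then "Web application with storage" else "Data storage solution")
     else if b5 then "Virtual machine infrastructure"
     else if b6 then "Secure secrets and key management"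
     else "Azure infrastructure deployment")
    = (match ([((b1 && b2 : Bool), "Web application with database backend"),
               (b1, "Web application hosting"),
               ((b3 && b4 : Bool), "Web application with storage"),
               (b3, "Data storage solution"),
               (b5, "Virtual machine infrastructure"),
               (b6, "Secure secrets and key management")] : List (Bool × String)).find? (fun r => r.1) with
       | some r => r.2
       | none => "Azure infrastructure deployment") := by
  cases b1 <;> cases b2 <;> cases b3 <;> cases b4 <;> cases b5 <;> cases b6 <;> rfl

-- ===== VERDICT (by name: the statement is the Claim_ definition above) =====
theorem infer_template_purpose_py_spec : Claim_equal_infer_template_purpose_py := by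
  intro td _
  unfold Spec_infer_template_purpose_py infer_template_purpose_py infer_template_purpose_py_alt
  simp only [pv_flags_eq, Bool.false_or, List.any_map, Function.comp]
  exact pv_rules_eq _ _ _ _ _ _
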